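-- pv_equiv track=rewrite | github.com/Vehmeyer/CS_Problems | II-IV.py | fibonacciSimpleSum2
-- ===== SOURCE A (Python) =====
-- def fibonacciSimpleSum2(n):
--     pass
--     fibNums = [0,1,1,2,3,5,8,13,21]
--
--     for i in range(len(fibNums)):
--         next_num = fibNums[-1] + fibNums[-2]
--         fibNums.append(next_num)
--
--     for i in range(len(fibNums)):
--         for j in range(i + 1, len(fibNums)):
--             if fibNums[i] + fibNums[j] == n:
--                 return True
--     return False
-- ===== SOURCE B (Python) =====
-- def fibonacciSimpleSum2(n):
--     fibNums = [0, 1, 1, 2, 3, 5, 8, 13, 21]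
--     for _ in range(len(fibNums)):
--         fibNums.append(fibNums[-1] + fibNums[-2])
--     seen = set()
--     for x in fibNums:
--         if n - x in seen:
--             return True
--         seen.add(x)
--     return False
-- ===== Notes on version B (the rewrite author's own statement) =====
-- stated objective: alternative
-- what changed: The nested i<j double loop over the fixed Fibonacci list is replaced by a single pass with an incrementally built 'seen' set (two-sum pattern): for each x, report True if n-x was already seen, else add x.
import Mathlib
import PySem

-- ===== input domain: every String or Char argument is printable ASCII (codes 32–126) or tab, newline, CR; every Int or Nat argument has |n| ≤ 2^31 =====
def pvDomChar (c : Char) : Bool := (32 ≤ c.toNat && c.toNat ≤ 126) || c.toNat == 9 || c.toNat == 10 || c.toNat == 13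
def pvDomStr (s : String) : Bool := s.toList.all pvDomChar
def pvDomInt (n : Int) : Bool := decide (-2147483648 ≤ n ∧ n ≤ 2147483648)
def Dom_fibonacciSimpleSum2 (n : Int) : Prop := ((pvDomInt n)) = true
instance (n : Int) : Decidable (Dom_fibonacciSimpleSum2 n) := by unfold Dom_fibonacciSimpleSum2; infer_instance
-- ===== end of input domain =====

-- B replaces A's quadratic nested pairwise scan over the fixed list by a single pass with an
-- incrementally built 'seen' set (the two-sum pattern); objective: alternative.

-- ===== PORT A =====
-- Both Pythons build fibNums by the same loop: start list of length 9, then 9 appends of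
-- fibNums[-1] + fibNums[-2] (Python evaluates range(len(fibNums)) once, at length 9).
-- The list is nonempty throughout, so fibNums[-1]/[-2] never raise; '.getD 0' is exact here.
def pvFibBuild : List Int :=
  (PySem.List.pyRange 0 9 1).foldl
    (fun fibNums _ =>
      fibNums ++ [(PySem.List.pyGet? fibNums (-1)).getD 0 + (PySem.List.pyGet? fibNums (-2)).getD 0])
    [0, 1, 1, 2, 3, 5, 8, 13, 21]

-- the nested i/j index loops with early 'return True' become nested List.any over the ranges
def fibonacciSimpleSum2 (n : Int) : Bool :=
  let fibNums := pvFibBuild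
  (PySem.List.pyRange 0 (fibNums.length : Int) 1).any fun i =>
    (PySem.List.pyRange (i + 1) (fibNums.length : Int) 1).any fun j =>
      ((PySem.List.pyGet? fibNums i).getD 0 + (PySem.List.pyGet? fibNums j).getD 0) == n

-- ===== PORT B =====
-- single pass with early return: seen holds the elements before x; hit iff n - x ∈ seen
def pvAltGo (n : Int) (xs : List Int) (seen : PySem.Set Int) : Bool :=
  match xs with
  | [] => false
  | x :: rest =>
      if PySem.Set.contains seen (n - x) then true else pvAltGo n rest (PySem.Set.add seen x)

def fibonacciSimpleSum2_alt (n : Int) : Bool :=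
  pvAltGo n pvFibBuild PySem.Set.empty

-- ===== PRECONDITION & SPEC =====
def Spec_fibonacciSimpleSum2 (n : Int) (out : Bool) : Prop := out = fibonacciSimpleSum2_alt n
instance (n : Int) (out : Bool) : Decidable (Spec_fibonacciSimpleSum2 n out) := by unfold Spec_fibonacciSimpleSum2; infer_instance

-- ===== CLAIM (what is proved, stated in full; the proofs are below) =====
def Claim_equal_fibonacciSimpleSum2 : Prop := ∀ (n : Int), Dom_fibonacciSimpleSum2 n → Spec_fibonacciSimpleSum2 n (fibonacciSimpleSum2 n)

-- ===== LEMMAS AND PROOFS =====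

-- proof-side restatement of A's nested scan: over the list's tails
def pvPairAny (n : Int) : List Int → Bool
  | [] => false
  | x :: rest => rest.any (fun y => x + y == n) || pvPairAny n rest

theorem pv_any_or {α : Type} (l : List α) (p q : α → Bool) :
    (l.any fun y => p y || q y) = (l.any p || l.any q) := by
  induction l with
  | nil => simp
  | cons a l ih => simp [ih, Bool.or_assoc, Bool.or_left_comm]

theorem pv_beq_decide (a b : Int) : (a == b) = decide (a = b) := by
  by_cases h : a = b <;> simp [h]

-- loop invariant for B's single pass: a hit uses either an element already in 'seen' or a pair inside xs
theorem pvAltGo_eq (n : Int) (xs : List Int) (seen : PySem.Set Int) :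
    pvAltGo n xs seen = (xs.any (fun x => PySem.Set.contains seen (n - x)) || pvPairAny n xs) := by
  induction xs generalizing seen with
  | nil => simp [pvAltGo, pvPairAny]
  | cons x rest ih =>
      simp only [pvAltGo, pvPairAny, List.any_cons]
      by_cases hd : n - x ∈ seen
      · simp [hd]
      · have hmem : ∀ y : Int, (n - y ∈ PySem.Set.add seen x) ↔ (x + y = n ∨ n - y ∈ seen) := by
          intro y
          rw [PySem.Set.mem_add]
          constructor
          · rintro (h1 | h1)
            · exact Or.inr h1
            · exact Or.inl (by omega)
          · rintro (h1 | h1)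
            · exact Or.inr (by omega)
            · exact Or.inl h1
        simp [hd, ih, hmem, pv_any_or, pv_beq_decide, Bool.or_comm, Bool.or_assoc]

-- evaluating A's concrete index loops gives exactly the tails scan over the built list
theorem pvA_eq_pairAny (n : Int) : fibonacciSimpleSum2 n = pvPairAny n pvFibBuild := by
  have h : pvFibBuild
      = [0, 1, 1, 2, 3, 5, 8, 13, 21, 34, 55, 89, 144, 233, 377, 610, 987, 1597] := by decide
  simp only [fibonacciSimpleSum2, h]
  simp [PySem.List.pyRange, PySem.List.pyGet?, PySem.List.pyIdx?, pvPairAny,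
    Function.comp, List.range_succ, List.any_cons, List.any_nil]

-- ===== VERDICT (by name: the statement is the Claim_ definition above) =====
theorem fibonacciSimpleSum2_spec : Claim_equal_fibonacciSimpleSum2 := by
  intro n _
  unfold Spec_fibonacciSimpleSum2
  rw [fibonacciSimpleSum2_alt, pvAltGo_eq, pvA_eq_pairAny]
  simp [PySem.Set.empty, PySem.Set.contains]
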